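-- pv_equiv track=rewrite | github.com/akto-api-security/tests-library | AI-Agent-tests/generate_new_tests.py | escape_yaml_string
-- ===== SOURCE A (Python) =====
-- def escape_yaml_string(value):
--     """Escape a string value for YAML."""
--     if not isinstance(value, str):
--         return str(value)
--
--     value = value.replace('\n', ' ').replace('\r', ' ')
--     value = ' '.join(value.split())
--
--     special_chars = [':', '{', '}', '[', ']', ',', '&', '*', '#', '?', '|', '-', '<', '>', '=', '!', '%', '@', '`']
--     needs_quoting = any(char in value for char in special_chars)
--
--     if value.startswith(' ') or value.endswith(' ') or '"' in value or "'" in value: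
--         needs_quoting = True
--
--     if needs_quoting:
--         value = value.replace('\\', '\\\\').replace('"', '\\"')
--         return f'"{value}"'
--
--     return value
-- ===== SOURCE B (Python) =====
-- def escape_yaml_string(value):
--     """Escape a string value for YAML."""
--     if not isinstance(value, str):
--         return str(value)
--
--     forbidden = set(':{}[],&*#?|-<>=!%@`"\'')
--     words = []        # normalized words, in order
--     ewords = []       # the same words, escaped for double-quoting
--     cur = []
--     ecur = []
--     needs_quoting = False
--     for c in value:
--         if c.isspace():
--             if cur:
--                 words.append(''.join(cur))
--                 ewords.append(''.join(ecur))
--                 cur = []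
--                 ecur = []
--         else:
--             cur.append(c)
--             if c in forbidden:
--                 needs_quoting = True
--             if c == '\\':
--                 ecur.append('\\\\')
--             elif c == '"':
--                 ecur.append('\\"')
--             else:
--                 ecur.append(c)
--     if cur:
--         words.append(''.join(cur))
--         ewords.append(''.join(ecur))
--
--     if needs_quoting:
--         return '"' + ' '.join(ewords) + '"'
--     return ' '.join(words)
-- ===== Notes on version B (the rewrite author's own statement) =====
-- stated objective: alternative
-- what changed: Replaces A's staged pipeline (two replace passes, split+join normalization, 21 whole-string substring scans, then two more replace passes for escaping) by a single character-level pass that tokenizes words, detects forbidden characters and builds the escaped form all in one loop.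
import Mathlib
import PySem

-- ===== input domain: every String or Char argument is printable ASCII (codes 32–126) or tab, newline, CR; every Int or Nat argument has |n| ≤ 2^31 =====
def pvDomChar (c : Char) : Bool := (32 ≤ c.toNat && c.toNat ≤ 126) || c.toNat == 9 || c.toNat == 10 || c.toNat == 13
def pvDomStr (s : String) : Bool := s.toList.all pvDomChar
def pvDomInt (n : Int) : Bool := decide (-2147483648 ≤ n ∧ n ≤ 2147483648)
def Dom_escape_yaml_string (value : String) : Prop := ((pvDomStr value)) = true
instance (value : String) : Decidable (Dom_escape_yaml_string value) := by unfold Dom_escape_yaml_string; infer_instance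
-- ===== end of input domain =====

-- B replaces A's staged pipeline (replace passes, split/join, 21 whole-string scans,
-- two escaping passes) by one single character-level pass that tokenizes, flags
-- forbidden characters and escapes in the same loop (objective: alternative).

-- ===== PORT A =====
def escape_yaml_string (value : String) : String :=
  let v1 := PySem.Str.replace (PySem.Str.replace value "\n" " ") "\r" " "
  let v := PySem.Str.join " " (PySem.Str.split₀ v1)
  let special_chars : List String :=
    [":", "{", "}", "[", "]", ",", "&", "*", "#", "?", "|", "-", "<", ">", "=", "!", "%", "@", "`"]
  let needs_quoting := special_chars.any (fun ch => PySem.Str.isIn ch v)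
  let needs_quoting :=
    if PySem.Str.startswith v " " || PySem.Str.endswith v " " ||
       PySem.Str.isIn "\"" v || PySem.Str.isIn "'" v then true else needs_quoting
  if needs_quoting then
    let v2 := PySem.Str.replace (PySem.Str.replace v "\\" "\\\\") "\"" "\\\""
    "\"" ++ v2 ++ "\""
  else v

-- ===== PORT B =====
def pvForbidden : PySem.Set Char :=
  PySem.Set.ofList
    [':', '{', '}', '[', ']', ',', '&', '*', '#', '?', '|', '-', '<', '>', '=', '!', '%', '@', '`', '"', '\'']

-- the characters appended to `ecur` for one input character (the if/elif/else of Source B)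
def pvEsc (c : Char) : List Char :=
  if c = '\\' then ['\\', '\\'] else if c = '"' then ['\\', '"'] else [c]

-- one iteration of Source B's for-loop; state = (words, cur, needs_quoting, ewords, ecur)
def pvStep (st : List (List Char) × List Char × Bool × List (List Char) × List Char)
    (c : Char) : List (List Char) × List Char × Bool × List (List Char) × List Char :=
  match st with
  | (words, cur, needs, ewords, ecur) =>
    if PySem.Chars.isspace c then
      if cur.isEmpty then (words, cur, needs, ewords, ecur)
      else (words ++ [cur], [], needs, ewords ++ [ecur], [])
    else
      (words, cur ++ [c], needs || PySem.Set.contains pvForbidden c, ewords, ecur ++ pvEsc c)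

def escape_yaml_string_alt (value : String) : String :=
  match value.toList.foldl pvStep ([], [], false, [], []) with
  | (words, cur, needs, ewords, ecur) =>
    let words := if cur.isEmpty then words else words ++ [cur]
    let ewords := if cur.isEmpty then ewords else ewords ++ [ecur]
    if needs then "\"" ++ String.ofList (PySem.Chars.join [' '] ewords) ++ "\""
    else String.ofList (PySem.Chars.join [' '] words)

-- ===== PRECONDITION & SPEC =====
def Spec_escape_yaml_string (value : String) (out : String) : Prop := out = escape_yaml_string_alt value
instance (value : String) (out : String) : Decidable (Spec_escape_yaml_string value out) := by unfold Spec_escape_yaml_string; infer_instance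

-- ===== CLAIM (what is proved, stated in full; the proofs are below) =====
def Claim_equal_escape_yaml_string : Prop := ∀ (value : String), Dom_escape_yaml_string value → Spec_escape_yaml_string value (escape_yaml_string value)

-- ===== LEMMAS AND PROOFS =====

-- escape one word
def pvEscW (w : List Char) : List Char := w.flatMap pvEsc

-- word splitter: (complete words so far, current partial word)
def pvWordsP : List Char → List Char → List (List Char) × List Char
  | [], cur => ([], cur)
  | c :: t, cur =>
    if PySem.Chars.isspace c then
      if cur.isEmpty then pvWordsP t []
      else (cur :: (pvWordsP t []).1, (pvWordsP t []).2)
    else pvWordsP t (cur ++ [c])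

lemma pv_go_eq (l : List Char) : ∀ (cur : List Char) (acc : List (List Char)),
    PySem.Chars.split₀.go l cur acc =
      acc.reverse ++ (pvWordsP l cur.reverse).1 ++
        (if (pvWordsP l cur.reverse).2.isEmpty then [] else [(pvWordsP l cur.reverse).2]) := by
  induction l with
  | nil =>
    intro cur acc
    rw [PySem.Chars.split₀.go.eq_def]
    by_cases h : cur = [] <;> simp [h, pvWordsP]
  | cons c t ih =>
    intro cur acc
    rw [PySem.Chars.split₀.go.eq_def]
    by_cases hs : PySem.Chars.isspace c
    · by_cases hc : cur = []
      · simp [hs, hc, pvWordsP, ih]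
      · simp [hs, hc, pvWordsP, ih [] (cur.reverse :: acc)]
    · simp [hs, pvWordsP, ih (c :: cur) acc]

lemma pv_split₀_eq (l : List Char) :
    PySem.Chars.split₀ l = (pvWordsP l []).1 ++
      (if (pvWordsP l []).2.isEmpty then [] else [(pvWordsP l []).2]) := by
  have h := pv_go_eq l [] []
  simpa [PySem.Chars.split₀] using h

lemma pv_fold (l : List Char) : ∀ (ws : List (List Char)) (cur : List Char) (nd : Bool),
    l.foldl pvStep (ws, cur, nd, ws.map pvEscW, pvEscW cur) =
      (ws ++ (pvWordsP l cur).1, (pvWordsP l cur).2,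
       nd || (l.filter (fun c => !PySem.Chars.isspace c)).any (fun c => PySem.Set.contains pvForbidden c),
       (ws ++ (pvWordsP l cur).1).map pvEscW, pvEscW (pvWordsP l cur).2) := by
  induction l with
  | nil => intro ws cur nd; simp [pvWordsP]
  | cons c t ih =>
    intro ws cur nd
    simp only [List.foldl_cons, pvStep]
    by_cases hs : PySem.Chars.isspace c
    · rw [if_pos hs]
      by_cases hc : cur = []
      · subst hc
        rw [if_pos (by simp)]
        have heq : pvWordsP (c :: t) ([] : List Char) = pvWordsP t [] := by
          simp [pvWordsP, hs]
        rw [ih ws [] nd, heq]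
        have hfil : List.filter (fun c => !PySem.Chars.isspace c) (c :: t)
            = List.filter (fun c => !PySem.Chars.isspace c) t :=
          List.filter_cons_of_neg (by simp [hs])
        rw [hfil]
      · rw [if_neg (by simp [hc])]
        have hih := ih (ws ++ [cur]) [] nd
        simp only [List.map_append, List.map_cons, List.map_nil,
          show pvEscW [] = [] from rfl] at hih
        rw [hih]
        have heq : pvWordsP (c :: t) cur = (cur :: (pvWordsP t []).1, (pvWordsP t []).2) := by
          simp [pvWordsP, hs, hc]
        have hfil : List.filter (fun c => !PySem.Chars.isspace c) (c :: t)
            = List.filter (fun c => !PySem.Chars.isspace c) t :=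
          List.filter_cons_of_neg (by simp [hs])
        rw [heq, hfil]
        simp
    · rw [if_neg hs]
      rw [show pvEscW cur ++ pvEsc c = pvEscW (cur ++ [c]) by simp [pvEscW],
        ih ws (cur ++ [c]) (nd || PySem.Set.contains pvForbidden c)]
      have heq : pvWordsP (c :: t) cur = pvWordsP t (cur ++ [c]) := by
        simp [pvWordsP, hs]
      have hfil : List.filter (fun c => !PySem.Chars.isspace c) (c :: t)
          = c :: List.filter (fun c => !PySem.Chars.isspace c) t :=
        List.filter_cons_of_pos (by simp [hs])
      rw [heq, hfil, List.any_cons, Bool.or_assoc]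

lemma pv_forb_not_space (c : Char) (h : PySem.Set.contains pvForbidden c = true) :
    PySem.Chars.isspace c = false := by
  have hmem : c ∈ [':', '{', '}', '[', ']', ',', '&', '*', '#', '?', '|', '-', '<', '>', '=', '!', '%', '@', '`', '"', '\''] := by
    have : c ∈ pvForbidden := by
      simpa [PySem.Set.contains, List.contains_iff_mem] using h
    exact (PySem.Set.mem_ofList _ c).mp this
  have hall : ([':', '{', '}', '[', ']', ',', '&', '*', '#', '?', '|', '-', '<', '>', '=', '!', '%', '@', '`', '"', '\''].all (fun c => !PySem.Chars.isspace c)) = true := by decide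
  have := List.all_eq_true.mp hall c hmem
  simpa using this

lemma pv_filter_any (l : List Char) :
    (l.filter (fun c => !PySem.Chars.isspace c)).any (fun c => PySem.Set.contains pvForbidden c)
      = l.any (fun c => PySem.Set.contains pvForbidden c) := by
  induction l with
  | nil => rfl
  | cons c t ih =>
    by_cases hs : PySem.Chars.isspace c
    · have hc : PySem.Set.contains pvForbidden c = false := by
        cases hcc : PySem.Set.contains pvForbidden c
        · rfl
        · exact absurd (pv_forb_not_space c hcc) (by simp [hs])
      rw [List.filter_cons_of_neg (by simp [hs]), List.any_cons, hc, Bool.false_or, ih]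
    · rw [List.filter_cons_of_pos (by simp [hs]), List.any_cons, List.any_cons, ih]

lemma pv_flatten (l : List Char) : ∀ cur,
    ((pvWordsP l cur).1).flatten ++ (pvWordsP l cur).2 = cur ++ l.filter (fun c => !PySem.Chars.isspace c) := by
  induction l with
  | nil => intro cur; simp [pvWordsP]
  | cons c t ih =>
    intro cur
    by_cases hs : PySem.Chars.isspace c
    · by_cases hc : cur = []
      · simp [pvWordsP, hs, hc, ih []]
      · simp [pvWordsP, hs, hc, ih []]
    · simp [pvWordsP, hs, ih (cur ++ [c])]

lemma pv_wf (l : List Char) : ∀ cur, (∀ c ∈ cur, PySem.Chars.isspace c = false) →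
    (∀ w ∈ (pvWordsP l cur).1, w ≠ [] ∧ ∀ c ∈ w, PySem.Chars.isspace c = false) ∧
    (∀ c ∈ (pvWordsP l cur).2, PySem.Chars.isspace c = false) := by
  induction l with
  | nil => intro cur h; exact ⟨by simp [pvWordsP], by simpa [pvWordsP] using h⟩
  | cons c t ih =>
    intro cur h
    by_cases hs : PySem.Chars.isspace c
    · by_cases hc : cur = []
      · have heq : pvWordsP (c :: t) cur = pvWordsP t [] := by simp [pvWordsP, hs, hc]
        rw [heq]
        exact ih [] (by simp)
      · have heq : pvWordsP (c :: t) cur = (cur :: (pvWordsP t []).1, (pvWordsP t []).2) := by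
          simp [pvWordsP, hs, hc]
        rw [heq]
        have hrest := ih [] (by simp)
        refine ⟨?_, hrest.2⟩
        intro w hw
        rcases List.mem_cons.mp hw with rfl | hw
        · exact ⟨hc, h⟩
        · exact hrest.1 w hw
    · have heq : pvWordsP (c :: t) cur = pvWordsP t (cur ++ [c]) := by simp [pvWordsP, hs]
      rw [heq]
      refine ih (cur ++ [c]) ?_
      intro d hd
      rcases List.mem_append.mp hd with hd | hd
      · exact h d hd
      · simp only [List.mem_singleton] at hd; subst hd; simpa using hs

lemma pv_replace_go_single (a : Char) (new : List Char) :
    ∀ (s : List Char) (fuel : Nat) (acc : List Char), s.length ≤ fuel →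
    PySem.Chars.replace.go [a] new fuel s acc
      = acc.reverse ++ s.flatMap (fun c => if c = a then new else [c]) := by
  intro s
  induction s with
  | nil =>
    intro f acc _
    rw [PySem.Chars.replace.go.eq_def]
    cases f <;> simp
  | cons c t ih =>
    intro f acc hf
    match f with
    | 0 => simp at hf
    | Nat.succ f' =>
      rw [PySem.Chars.replace.go.eq_def]
      have hpre : ([a].isPrefixOf (c :: t)) = (a == c) := by simp [List.isPrefixOf]
      show (if ([a].isPrefixOf (c :: t)) = true then
          PySem.Chars.replace.go [a] new f' (List.drop [a].length (c :: t)) (new.reverse ++ acc)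
        else PySem.Chars.replace.go [a] new f' t (c :: acc))
        = acc.reverse ++ (c :: t).flatMap (fun c => if c = a then new else [c])
      rw [hpre]
      by_cases h : a = c
      · subst h
        rw [if_pos (show (a == a) = true by simp)]
        have hd : List.drop [a].length (a :: t) = t := by simp
        rw [hd, ih f' (new.reverse ++ acc) (by simpa using Nat.le_of_succ_le_succ hf)]
        simp
      · rw [if_neg (by simp [h])]
        rw [ih f' (c :: acc) (by simpa using Nat.le_of_succ_le_succ hf)]
        have hne : c ≠ a := fun hc => h hc.symm
        simp [hne]

lemma pv_replace_single (a : Char) (new s : List Char) :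
    PySem.Chars.replace s [a] new = s.flatMap (fun c => if c = a then new else [c]) := by
  rw [PySem.Chars.replace]
  simpa using pv_replace_go_single a new s s.length [] (le_refl _)

lemma pv_replace_map (a b : Char) (s : List Char) :
    PySem.Chars.replace s [a] [b] = s.map (fun c => if c = a then b else c) := by
  rw [pv_replace_single]
  have : (fun c => if c = a then [b] else [c]) = fun c => [if c = a then b else c] := by
    funext c; split <;> rfl
  rw [this, ← List.map_eq_flatMap]

-- the composed normalization map of A's two replace calls
def pvG (c : Char) : Char :=
  if (if c = '\n' then ' ' else c) = '\r' then ' ' else (if c = '\n' then ' ' else c)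

lemma pv_words_map (l : List Char) : ∀ cur, pvWordsP (l.map pvG) cur = pvWordsP l cur := by
  have hg1 : ∀ c, PySem.Chars.isspace (pvG c) = PySem.Chars.isspace c := by
    intro c
    by_cases h1 : c = '\n'
    · subst h1; rfl
    · by_cases h2 : c = '\r'
      · subst h2; rfl
      · simp [pvG, h1, h2]
  have hg2 : ∀ c, PySem.Chars.isspace c = false → pvG c = c := by
    intro c h
    have h1 : c ≠ '\n' := by
      rintro rfl
      rw [show PySem.Chars.isspace '\n' = true from by decide] at h
      exact Bool.noConfusion h
    have h2 : c ≠ '\r' := by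
      rintro rfl
      rw [show PySem.Chars.isspace '\r' = true from by decide] at h
      exact Bool.noConfusion h
    simp [pvG, h1, h2]
  induction l with
  | nil => intro cur; rfl
  | cons c t ih =>
    intro cur
    simp only [List.map_cons, pvWordsP, hg1 c]
    by_cases hs : PySem.Chars.isspace c
    · simp [hs, ih]
    · simp [hs, hg2 c (by simpa using hs), ih]

lemma pv_mem_join (ws : List (List Char)) (c : Char) (h : c ∈ PySem.Chars.join [' '] ws) :
    c = ' ' ∨ c ∈ ws.flatten := by
  induction ws with
  | nil => simp [PySem.Chars.join_nil] at h
  | cons w rest ih =>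
    cases rest with
    | nil =>
      rw [PySem.Chars.join_singleton] at h
      exact Or.inr (by simpa using h)
    | cons x t =>
      rw [PySem.Chars.join_cons_cons] at h
      rcases List.mem_append.mp h with h' | h'
      · rcases List.mem_append.mp h' with h'' | h''
        · exact Or.inr (by simp [h''])
        · exact Or.inl (by simpa using h'')
      · rcases ih h' with h'' | h''
        · exact Or.inl h''
        · exact Or.inr (by simp at h'' ⊢; tauto)

lemma pv_mem_join' (ws : List (List Char)) (c : Char) (h : c ∈ ws.flatten) :
    c ∈ PySem.Chars.join [' '] ws := by
  induction ws with
  | nil => simp at h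
  | cons w rest ih =>
    cases rest with
    | nil => rw [PySem.Chars.join_singleton]; simpa using h
    | cons x t =>
      rw [PySem.Chars.join_cons_cons]
      simp only [List.flatten_cons, List.mem_append] at h
      rcases h with h | h
      · simp [h]
      · have := ih (by simpa using h)
        simp [this]

lemma pv_any_eq (l : List Char) :
    (PySem.Chars.join [' '] (PySem.Chars.split₀ l)).any (fun c => PySem.Set.contains pvForbidden c)
      = l.any (fun c => PySem.Set.contains pvForbidden c) := by
  have hflat : (PySem.Chars.split₀ l).flatten = l.filter (fun c => !PySem.Chars.isspace c) := by
    rw [pv_split₀_eq]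
    by_cases h : (pvWordsP l []).2 = []
    · simpa [h] using pv_flatten l []
    · simpa [h] using pv_flatten l []
  rw [Bool.eq_iff_iff]
  simp only [List.any_eq_true]
  constructor
  · rintro ⟨c, hc, hforb⟩
    rcases pv_mem_join _ c hc with rfl | hmem
    · exact absurd (pv_forb_not_space _ hforb) (by decide)
    · rw [hflat] at hmem
      exact ⟨c, List.mem_of_mem_filter hmem, hforb⟩
  · rintro ⟨c, hc, hforb⟩
    refine ⟨c, pv_mem_join' _ c ?_, hforb⟩
    rw [hflat]
    exact List.mem_filter.mpr ⟨hc, by simp [pv_forb_not_space c hforb]⟩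

lemma pv_head_nonspace (ws : List (List Char))
    (hwf : ∀ w ∈ ws, w ≠ [] ∧ ∀ c ∈ w, PySem.Chars.isspace c = false) :
    ∀ a, (PySem.Chars.join [' '] ws).head? = some a → PySem.Chars.isspace a = false := by
  intro a h
  cases ws with
  | nil => rw [PySem.Chars.join_nil] at h; simp at h
  | cons w rest =>
    obtain ⟨hne, hnsp⟩ := hwf w (by simp)
    cases rest with
    | nil =>
      rw [PySem.Chars.join_singleton] at h
      cases w with
      | nil => exact absurd rfl hne
      | cons d w' =>
        rw [List.head?_cons] at h
        injection h with h
        subst h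
        exact hnsp _ (by simp)
    | cons x t =>
      rw [PySem.Chars.join_cons_cons] at h
      cases w with
      | nil => exact absurd rfl hne
      | cons d w' =>
        simp only [List.cons_append, List.head?_cons] at h
        injection h with h
        subst h
        exact hnsp _ (by simp)

lemma pv_start_false (ws : List (List Char))
    (hwf : ∀ w ∈ ws, w ≠ [] ∧ ∀ c ∈ w, PySem.Chars.isspace c = false) :
    PySem.Chars.startswith (PySem.Chars.join [' '] ws) [' '] = false := by
  cases hsw : PySem.Chars.startswith (PySem.Chars.join [' '] ws) [' ']
  · rfl
  · exfalso
    obtain ⟨t, ht⟩ := (PySem.Chars.startswith_iff _ _).mp hsw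
    have hh : (PySem.Chars.join [' '] ws).head? = some ' ' := by
      rw [← ht]; rfl
    exact absurd (pv_head_nonspace ws hwf ' ' hh) (by decide)

lemma pv_join_ne_nil (ws : List (List Char)) (hws : ws ≠ [])
    (hwf : ∀ w ∈ ws, w ≠ [] ∧ ∀ c ∈ w, PySem.Chars.isspace c = false) :
    PySem.Chars.join [' '] ws ≠ [] := by
  cases ws with
  | nil => exact absurd rfl hws
  | cons w rest =>
    cases rest with
    | nil => rw [PySem.Chars.join_singleton]; exact (hwf w (by simp)).1
    | cons x t =>
      rw [PySem.Chars.join_cons_cons]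
      have := (hwf w (by simp)).1
      simp [this]

lemma pv_last_nonspace (ws : List (List Char))
    (hwf : ∀ w ∈ ws, w ≠ [] ∧ ∀ c ∈ w, PySem.Chars.isspace c = false) :
    ∀ a, (PySem.Chars.join [' '] ws).getLast? = some a → PySem.Chars.isspace a = false := by
  induction ws with
  | nil => intro a h; rw [PySem.Chars.join_nil] at h; simp at h
  | cons w rest ih =>
    intro a h
    cases rest with
    | nil =>
      rw [PySem.Chars.join_singleton] at h
      exact (hwf w (by simp)).2 a (List.mem_of_getLast? h)
    | cons x t =>
      rw [PySem.Chars.join_cons_cons] at h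
      have hj : PySem.Chars.join [' '] (x :: t) ≠ [] :=
        pv_join_ne_nil _ (by simp) (fun w hw => hwf w (by simp [hw]))
      rw [List.getLast?_append_of_ne_nil _ hj] at h
      exact ih (fun w hw => hwf w (by simp [hw])) a h

lemma pv_end_false (ws : List (List Char))
    (hwf : ∀ w ∈ ws, w ≠ [] ∧ ∀ c ∈ w, PySem.Chars.isspace c = false) :
    PySem.Chars.endswith (PySem.Chars.join [' '] ws) [' '] = false := by
  cases hew : PySem.Chars.endswith (PySem.Chars.join [' '] ws) [' ']
  · rfl
  · exfalso
    obtain ⟨t, ht⟩ := (PySem.Chars.endswith_iff _ _).mp hew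
    have : (PySem.Chars.join [' '] ws).getLast? = some ' ' := by
      rw [← ht]; simp
    exact absurd (pv_last_nonspace ws hwf ' ' this) (by decide)

lemma pv_escW_join (ws : List (List Char)) :
    pvEscW (PySem.Chars.join [' '] ws) = PySem.Chars.join [' '] (ws.map pvEscW) := by
  induction ws with
  | nil => simp [pvEscW, PySem.Chars.join_nil]
  | cons w rest ih =>
    cases rest with
    | nil => simp [PySem.Chars.join_singleton]
    | cons x t =>
      have hApp : ∀ u v : List Char, pvEscW (u ++ v) = pvEscW u ++ pvEscW v :=
        fun u v => List.flatMap_append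
      rw [PySem.Chars.join_cons_cons, hApp, hApp, show pvEscW [' '] = [' '] from rfl, ih,
        show List.map pvEscW (w :: x :: t) = pvEscW w :: pvEscW x :: List.map pvEscW t from rfl,
        PySem.Chars.join_cons_cons,
        show (pvEscW x :: List.map pvEscW t) = List.map pvEscW (x :: t) from rfl]

lemma pv_escape_eq (m : List Char) :
    PySem.Chars.replace (PySem.Chars.replace m ['\\'] ['\\', '\\']) ['"'] ['\\', '"'] = pvEscW m := by
  rw [pv_replace_single, pv_replace_single, List.flatMap_assoc]
  unfold pvEscW
  congr 1
  funext c
  by_cases h1 : c = '\\'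
  · subst h1; rfl
  · by_cases h2 : c = '"'
    · subst h2; rfl
    · simp [h1, h2, pvEsc]

lemma singleton_infix_iff {c : Char} {l : List Char} : [c] <:+: l ↔ c ∈ l := by
  constructor
  · intro h; exact List.singleton_sublist.mp h.sublist
  · intro h
    obtain ⟨s, t, rfl⟩ := List.append_of_mem h
    exact ⟨s, t, by simp⟩

lemma isIn_single (c : Char) (l : List Char) : PySem.Chars.isIn [c] l = true ↔ c ∈ l := by
  rw [PySem.Chars.isIn_iff_infix]; exact singleton_infix_iff

set_option maxHeartbeats 2000000 in
lemma flag_eq (w : String) :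
    ([":", "{", "}", "[", "]", ",", "&", "*", "#", "?", "|", "-", "<", ">", "=", "!", "%", "@", "`"].any
        (fun ch => PySem.Str.isIn ch w) ||
      PySem.Str.isIn "\"" w || PySem.Str.isIn "'" w)
    = w.toList.any (fun c => PySem.Set.contains pvForbidden c) := by
  rw [Bool.eq_iff_iff]
  simp [isIn_single, pvForbidden, List.any_eq_true, PySem.Set.mem_ofList]
  constructor
  · intro h
    rcases h with ((h|h|h|h|h|h|h|h|h|h|h|h|h|h|h|h|h|h|h)|h)|h <;> exact ⟨_, h, by simp⟩
  · rintro ⟨c, hc, h⟩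
    rcases h with rfl|rfl|rfl|rfl|rfl|rfl|rfl|rfl|rfl|rfl|rfl|rfl|rfl|rfl|rfl|rfl|rfl|rfl|rfl|rfl|rfl <;> simp [hc]

lemma pv_bool (a b c : Bool) : (if b || c then true else a) = (a || b || c) := by
  cases a <;> cases b <;> cases c <;> rfl

-- canonical form of both programs
def pvCanon (value : String) : String :=
  if value.toList.any (fun c => PySem.Set.contains pvForbidden c) then
    "\"" ++ String.ofList (PySem.Chars.join [' ']
      ((PySem.Chars.split₀ value.toList).map pvEscW)) ++ "\""
  else String.ofList (PySem.Chars.join [' '] (PySem.Chars.split₀ value.toList))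

lemma pv_wf_split₀ (l : List Char) :
    ∀ w ∈ PySem.Chars.split₀ l, w ≠ [] ∧ ∀ c ∈ w, PySem.Chars.isspace c = false := by
  intro w hw
  rw [pv_split₀_eq] at hw
  have hwf := pv_wf l [] (by simp)
  rcases List.mem_append.mp hw with h | h
  · exact hwf.1 w h
  · by_cases h2 : (pvWordsP l []).2 = []
    · simp [h2] at h
    · rw [if_neg (by simpa using h2)] at h
      rw [List.mem_singleton] at h
      subst h
      exact ⟨h2, hwf.2⟩

set_option maxHeartbeats 1000000 in
lemma pv_B_eq (value : String) : escape_yaml_string_alt value = pvCanon value := by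
  have hfold := pv_fold value.toList [] [] false
  simp only [List.map_nil, show pvEscW [] = [] from rfl, List.nil_append, Bool.false_or,
    pv_filter_any] at hfold
  unfold escape_yaml_string_alt pvCanon
  rw [hfold]
  by_cases h2 : (pvWordsP value.toList []).2 = []
  · rw [pv_split₀_eq]
    simp [h2]
  · rw [pv_split₀_eq]
    simp [h2]

set_option maxHeartbeats 1000000 in
lemma pv_A_eq (value : String) : escape_yaml_string value = pvCanon value := by
  unfold escape_yaml_string pvCanon
  have hv1 : (PySem.Str.replace (PySem.Str.replace value "\n" " ") "\r" " ").toList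
      = value.toList.map pvG := by
    rw [PySem.Str.toList_replace, PySem.Str.toList_replace]
    rw [show ("\n" : String).toList = ['\n'] from rfl, show ("\r" : String).toList = ['\r'] from rfl,
      show (" " : String).toList = [' '] from rfl, pv_replace_map, pv_replace_map, List.map_map]
    rfl
  have hvL : (PySem.Str.join " " (PySem.Str.split₀
      (PySem.Str.replace (PySem.Str.replace value "\n" " ") "\r" " "))).toList
      = PySem.Chars.join [' '] (PySem.Chars.split₀ value.toList) := by
    rw [PySem.Str.toList_join, PySem.Str.split₀_map_toList, hv1]
    have hsp : PySem.Chars.split₀ (value.toList.map pvG) = PySem.Chars.split₀ value.toList := by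
      rw [pv_split₀_eq, pv_split₀_eq, pv_words_map]
    rw [hsp]
    rfl
  have hwf := pv_wf_split₀ value.toList
  have hsw : PySem.Str.startswith (PySem.Str.join " " (PySem.Str.split₀
      (PySem.Str.replace (PySem.Str.replace value "\n" " ") "\r" " "))) " " = false := by
    rw [PySem.Str.startswith_eq, hvL]
    exact pv_start_false _ hwf
  have hew : PySem.Str.endswith (PySem.Str.join " " (PySem.Str.split₀
      (PySem.Str.replace (PySem.Str.replace value "\n" " ") "\r" " "))) " " = false := by
    rw [PySem.Str.endswith_eq, hvL]
    exact pv_end_false _ hwf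
  simp only [hsw, hew, Bool.false_or, pv_bool, flag_eq, hvL, pv_any_eq]
  by_cases hneed : value.toList.any (fun c => PySem.Set.contains pvForbidden c) = true
  · rw [if_pos hneed, if_pos hneed]
    apply String.toList_injective
    simp only [String.toList_append, String.toList_ofList]
    rw [PySem.Str.toList_replace, PySem.Str.toList_replace, hvL]
    rw [show ("\\" : String).toList = ['\\'] from rfl,
      show ("\\\\" : String).toList = ['\\', '\\'] from rfl,
      show ("\"" : String).toList = ['"'] from rfl,
      show ("\\\"" : String).toList = ['\\', '"'] from rfl]
    rw [pv_escape_eq, pv_escW_join]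
  · rw [if_neg hneed, if_neg hneed]
    apply String.toList_injective
    rw [hvL, String.toList_ofList]

-- ===== VERDICT (by name: the statement is the Claim_ definition above) =====
theorem escape_yaml_string_spec : Claim_equal_escape_yaml_string := by
  intro value _
  unfold Spec_escape_yaml_string
  rw [pv_A_eq, pv_B_eq]
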